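-- pv_equiv track=rewrite | github.com/jmLasc/EndangeredLanguageL3 | Atayal/6.2.code(new_version).py | copy_substring
-- ===== SOURCE A (Python) =====
-- import string
--
-- def copy_substring(line, end_chars):
--     valid_start_chars = string.ascii_letters
--     start_index = None
--     for i, char in enumerate(line):
--         if char in valid_start_chars:
--             start_index = i
--             break
--     if start_index is None:
--         return None
--     i = start_index + 1
--     while i < len(line):
--         if line[i] in end_chars:
--             end_index = i
--             substring = line[start_index:end_index + 1]
--             return substring
--         i += 1
--     return None
-- ===== SOURCE B (Python) =====
-- import string
--
--
-- def copy_substring(line, end_chars):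
--     start = next((i for i, ch in enumerate(line) if ch in string.ascii_letters), None)
--     if start is None:
--         return None
--     best = None
--     for c in end_chars:
--         pos = line.find(c, start + 1)
--         if pos != -1 and (best is None or pos < best):
--             best = pos
--     return None if best is None else line[start:best + 1]
-- ===== Notes on version B (the rewrite author's own statement) =====
-- stated objective: alternative
-- what changed: The end-of-substring phase no longer scans line forward character by character; instead B loops over end_chars, uses str.find(c, start+1) for each end character, and keeps the minimum found position.
import Mathlib
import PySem

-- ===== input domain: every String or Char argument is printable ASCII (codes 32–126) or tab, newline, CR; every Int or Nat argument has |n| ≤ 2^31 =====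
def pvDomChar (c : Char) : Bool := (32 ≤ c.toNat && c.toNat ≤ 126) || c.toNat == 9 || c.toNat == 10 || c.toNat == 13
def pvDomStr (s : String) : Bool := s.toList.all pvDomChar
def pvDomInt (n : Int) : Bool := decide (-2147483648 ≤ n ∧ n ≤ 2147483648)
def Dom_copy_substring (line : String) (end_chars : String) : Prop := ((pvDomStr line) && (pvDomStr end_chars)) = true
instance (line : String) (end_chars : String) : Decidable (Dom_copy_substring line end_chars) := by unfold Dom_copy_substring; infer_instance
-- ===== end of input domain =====

-- B replaces A's forward character scan for the end position by a loop over end_chars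
-- taking the minimum of str.find(c, start+1); same results, an alternative decomposition.

-- ===== PORT A =====
-- string.ascii_letters
def asciiLetters : List Char :=
  "abcdefghijklmnopqrstuvwxyzABCDEFGHIJKLMNOPQRSTUVWXYZ".toList

-- A's for-loop with break: first index whose char is an ASCII letter
def findStartA : List Char → Nat → Option Nat
  | [], _ => none
  | c :: rest, i => if asciiLetters.contains c then some i else findStartA rest (i + 1)

-- A's while loop: first index i ≥ start+1 with line[i] in end_chars
def whileA (cs ecs : List Char) (i : Nat) : Option Nat :=
  if h : i < cs.length then
    if ecs.contains cs[i] then some i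
    else whileA cs ecs (i + 1)
  else none
termination_by cs.length - i

def copy_substring (line : String) (end_chars : String) : Option String :=
  let cs := line.toList
  match findStartA cs 0 with
  | none => none
  | some s =>
    match whileA cs end_chars.toList (s + 1) with
    | none => none
    | some e => some (String.mk ((cs.drop s).take (e + 1 - s)))

-- ===== PORT B =====
-- line.find(c, i): first absolute index ≥ i where c occurs, as an Option (none = -1)
def findFromB (cs : List Char) (c : Char) (i : Nat) : Option Nat :=
  ((cs.drop i).findIdx? (fun x => x == c)).map (· + i)

-- B's loop body: keep pos when it was found and is smaller than best
def keepMinB (best : Option Nat) (pos : Option Nat) : Option Nat :=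
  match pos with
  | none => best
  | some p =>
    match best with
    | none => some p
    | some b => if p < b then some p else some b

def copy_substring_alt (line : String) (end_chars : String) : Option String :=
  let cs := line.toList
  match cs.findIdx? (fun c => asciiLetters.contains c) with
  | none => none
  | some s =>
    match end_chars.toList.foldl (fun best c => keepMinB best (findFromB cs c (s + 1))) none with
    | none => none
    | some e => some (String.mk ((cs.drop s).take (e + 1 - s)))

-- ===== PRECONDITION & SPEC =====
def Spec_copy_substring (line : String) (end_chars : String) (out : Option String) : Prop := out = copy_substring_alt line end_chars
instance (line : String) (end_chars : String) (out : Option String) : Decidable (Spec_copy_substring line end_chars out) := by unfold Spec_copy_substring; infer_instance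

-- ===== CLAIM (what is proved, stated in full; the proofs are below) =====
def Claim_equal_copy_substring : Prop := ∀ (line : String) (end_chars : String), Dom_copy_substring line end_chars → Spec_copy_substring line end_chars (copy_substring line end_chars)

-- ===== LEMMAS AND PROOFS =====

theorem keepMinB_none_right (b : Option Nat) : keepMinB b none = b := by
  cases b <;> rfl

theorem keepMinB_none_left (b : Option Nat) : keepMinB none b = b := by
  cases b <;> rfl

theorem keepMinB_some (a b : Nat) : keepMinB (some a) (some b) = some (min a b) := by
  simp only [keepMinB]
  split_ifs with h <;> (congr 1; omega)

theorem keepMinB_assoc (a b c : Option Nat) :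
    keepMinB (keepMinB a b) c = keepMinB a (keepMinB b c) := by
  cases a <;> cases b <;> cases c <;>
    simp only [keepMinB_none_left, keepMinB_none_right, keepMinB_some, Nat.min_assoc]

theorem keepMinB_map_add (j : Nat) (a b : Option Nat) :
    keepMinB (a.map (· + j)) (b.map (· + j)) = (keepMinB a b).map (· + j) := by
  cases a <;> cases b <;>
    simp only [Option.map_none, Option.map_some, keepMinB_none_left, keepMinB_none_right,
      keepMinB_some, Option.map_some] <;>
    first
      | rfl
      | (congr 1; omega)

-- peel the first step of B's fold out of the accumulator
theorem foldl_keepMinB (m : Char → Option Nat) :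
    ∀ (l : List Char) (acc : Option Nat),
      l.foldl (fun b c => keepMinB b (m c)) acc
        = keepMinB acc (l.foldl (fun b c => keepMinB b (m c)) none) := by
  intro l
  induction l with
  | nil => intro acc; simp [keepMinB_none_right]
  | cons c rest ih =>
    intro acc
    simp only [List.foldl_cons]
    rw [ih (keepMinB acc (m c)), ih (keepMinB none (m c)), keepMinB_assoc, keepMinB_none_left]

-- min of two first-occurrence searches = first occurrence of the disjunction
theorem findIdx?_keepMinB (p q : Char → Bool) :
    ∀ (d : List Char),
      keepMinB (d.findIdx? p) (d.findIdx? q) = d.findIdx? (fun x => p x || q x) := by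
  intro d
  induction d with
  | nil => rfl
  | cons x d ih =>
    by_cases hp : p x
    · cases hq : q x <;>
        simp [List.findIdx?_cons, hp, hq, keepMinB] <;>
        cases d.findIdx? q <;> simp [keepMinB]
    · by_cases hq : q x
      · simp [List.findIdx?_cons, hp, hq]
        cases d.findIdx? p <;> simp [keepMinB]
      · simp only [List.findIdx?_cons, hp, hq, Bool.false_or, Bool.false_eq_true, if_false]
        rw [keepMinB_map_add 1, ih]

-- B's whole fold = first index (in cs.drop i) of a char of ecs, shifted by i
theorem fold_eq_findIdx (cs : List Char) (i : Nat) :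
    ∀ (ecs : List Char),
      ecs.foldl (fun best c => keepMinB best (findFromB cs c i)) none
        = ((cs.drop i).findIdx? (fun x => ecs.contains x)).map (· + i) := by
  intro ecs
  induction ecs with
  | nil =>
    simp [List.findIdx?_eq_none_iff]
  | cons c rest ih =>
    simp only [List.foldl_cons]
    rw [foldl_keepMinB, ih, keepMinB_none_left]
    unfold findFromB
    rw [keepMinB_map_add i, findIdx?_keepMinB]
    have hfun : (fun x => (x == c) || rest.contains x) = (fun x => (c :: rest).contains x) := by
      funext x; rw [List.contains_cons]
    rw [hfun]

-- A's while loop = first index ≥ i of a char of ecs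
theorem whileA_eq (cs ecs : List Char) :
    ∀ (i : Nat),
      whileA cs ecs i = ((cs.drop i).findIdx? (fun x => ecs.contains x)).map (· + i) := by
  intro i
  induction hwf : cs.length - i using Nat.strong_induction_on generalizing i with
  | _ n ih =>
    unfold whileA
    by_cases h : i < cs.length
    · have hd : cs.drop i = cs[i] :: cs.drop (i + 1) := List.drop_eq_getElem_cons h
      rw [hd]
      by_cases hc : ecs.contains cs[i]
      · rw [dif_pos h, if_pos hc, List.findIdx?_cons, if_pos hc]
        simp
      · have hrec := ih (cs.length - (i + 1)) (by omega) (i + 1) rfl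
        rw [dif_pos h, if_neg (by simpa using hc), List.findIdx?_cons, if_neg (by simpa using hc), hrec]
        cases (cs.drop (i + 1)).findIdx? (fun x => ecs.contains x) with
        | none => rfl
        | some v =>
          have hv : v + (i + 1) = v + 1 + i := by omega
          simp [hv]
    · have hd : cs.drop i = [] := List.drop_eq_nil_of_le (by omega)
      simp [h, hd]

-- A's for-loop = findIdx? of being a letter, shifted by the starting counter
theorem findStartA_eq :
    ∀ (cs : List Char) (i : Nat),
      findStartA cs i = (cs.findIdx? (fun c => asciiLetters.contains c)).map (· + i) := by
  intro cs
  induction cs with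
  | nil => intro i; rfl
  | cons c rest ih =>
    intro i
    by_cases hc : asciiLetters.contains c
    · simp only [findStartA]
      rw [if_pos hc, List.findIdx?_cons, if_pos hc]
      simp
    · simp only [findStartA]
      rw [if_neg (by simpa using hc), List.findIdx?_cons, if_neg (by simpa using hc), ih (i + 1)]
      cases rest.findIdx? (fun c => asciiLetters.contains c) with
      | none => rfl
      | some v =>
        have hv : v + (i + 1) = v + 1 + i := by omega
        simp [hv]

-- ===== VERDICT (by name: the statement is the Claim_ definition above) =====
theorem copy_substring_spec : Claim_equal_copy_substring := by
  intro line end_chars _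
  show copy_substring line end_chars = copy_substring_alt line end_chars
  unfold copy_substring copy_substring_alt
  simp only [findStartA_eq, fold_eq_findIdx, whileA_eq]
  cases h : line.toList.findIdx? (fun c => asciiLetters.contains c) <;> simp [h]
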